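-- pv_equiv track=rewrite | github.com/Phishy1337/CS2100 | risk_exact.py | next_roll
-- ===== SOURCE A (Python) =====
-- def next_roll(rolls, n, idx):
--       if rolls[idx] < n:
--           rolls[idx] += 1
--           return True
--
--       rolls[idx] = 1
--       if idx == 0:
--           return False
--
--       return next_roll(rolls, n, idx - 1)
-- ===== SOURCE B (Python) =====
-- def next_roll(rolls, n, idx):
--     # Find the lowest-significance position (scanning right-to-left) that can
--     # still be incremented, then reset everything to its right in one bulk
--     # slice assignment, instead of carrying one step at a time recursively.
--     for j in range(idx, -1, -1):
--         if rolls[j] < n: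
--             rolls[j] += 1
--             rolls[j + 1:idx + 1] = [1] * (idx - j)
--             return True
--     rolls[0:idx + 1] = [1] * (idx + 1)
--     return False
-- ===== Notes on version B (the rewrite author's own statement) =====
-- stated objective: alternative
-- what changed: Replaces the step-by-step recursive carry with a single right-to-left scan that locates the incrementable position and performs one bulk slice-assignment reset of the digits to its right.
-- outside the precondition, e.g. on next_roll([5], 9, -1): A returns True, B returns False
import Mathlib
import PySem

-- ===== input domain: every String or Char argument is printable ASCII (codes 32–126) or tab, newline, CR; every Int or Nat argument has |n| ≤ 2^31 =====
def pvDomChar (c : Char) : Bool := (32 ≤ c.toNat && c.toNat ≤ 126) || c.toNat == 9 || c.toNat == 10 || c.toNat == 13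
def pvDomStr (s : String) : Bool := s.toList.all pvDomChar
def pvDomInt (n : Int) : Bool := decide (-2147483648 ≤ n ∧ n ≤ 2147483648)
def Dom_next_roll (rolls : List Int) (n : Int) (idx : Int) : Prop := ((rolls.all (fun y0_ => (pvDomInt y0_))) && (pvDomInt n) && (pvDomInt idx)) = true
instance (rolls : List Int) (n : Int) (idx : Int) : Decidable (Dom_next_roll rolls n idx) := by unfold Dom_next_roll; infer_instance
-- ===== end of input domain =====

-- B replaces A's step-by-step recursive carry with one right-to-left scan for the
-- incrementable position plus a bulk reset (alternative decomposition, same cost).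
-- Both Pythons mutate `rolls` in place identically on Pre_; the equivalence proved
-- here is about the RETURN value only.


-- ===== PORT A =====
-- Only the return value is ported: each index is READ before the carry moves left,
-- so the reads always see the original list and the pure recursion is faithful.
def next_roll (rolls : List Int) (n : Int) (idx : Int) : Bool :=
  match h : PySem.List.pyGet? rolls idx with
  | none => false          -- IndexError in Python; excluded by Pre_
  | some v =>
    if v < n then true
    else if idx = 0 then false
    else next_roll rolls n (idx - 1)
termination_by (idx + rolls.length + 1).toNat
decreasing_by
  have hin : PySem.Raise.InRange rolls.length idx := by
    by_contra hc
    rw [← PySem.List.pyGet?_eq_none_iff (xs := rolls)] at hc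
    simp [hc] at h
  unfold PySem.Raise.InRange at hin
  omega

-- ===== PORT B =====
-- port of Source B's `for j in range(idx, -1, -1): if rolls[j] < n: return True` /
-- `return False`; the slice assignments only mutate, they do not affect the result.
def next_roll_alt (rolls : List Int) (n : Int) (idx : Int) : Bool :=
  (PySem.List.pyRange idx (-1) (-1)).any (fun j =>
    match PySem.List.pyGet? rolls j with
    | some v => decide (v < n)
    | none => false)       -- IndexError in Python; excluded by Pre_

-- ===== PRECONDITION & SPEC =====
-- Pre_ excludes idx ≥ len(rolls) (A raises IndexError there) and negative idx,
-- where A's value is an artefact of Python's negative-index wraparound (B's scan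
-- naturally sees an empty range and returns False).
def Pre_next_roll (rolls : List Int) (n : Int) (idx : Int) : Prop :=
  0 ≤ idx ∧ idx < rolls.length
instance (rolls : List Int) (n : Int) (idx : Int) : Decidable (Pre_next_roll rolls n idx) := by unfold Pre_next_roll; infer_instance
def pvWitness_next_roll : List Int × Int × Int := ([2, 3, 3], 3, 2)

def Spec_next_roll (rolls : List Int) (n : Int) (idx : Int) (out : Bool) : Prop := out = next_roll_alt rolls n idx
instance (rolls : List Int) (n : Int) (idx : Int) (out : Bool) : Decidable (Spec_next_roll rolls n idx out) := by unfold Spec_next_roll; infer_instance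

-- ===== CLAIM (what is proved, stated in full; the proofs are below) =====
def Claim_equal_next_roll : Prop := ∀ (rolls : List Int) (n : Int) (idx : Int), Dom_next_roll rolls n idx → Pre_next_roll rolls n idx → Spec_next_roll rolls n idx (next_roll rolls n idx)

-- ===== LEMMAS AND PROOFS =====

-- On an in-range natural index, A's carry recursion equals B's countdown scan.
theorem next_roll_eq_alt_of_nat (rolls : List Int) (n : Int) (k : Nat)
    (hk : (k : Int) < rolls.length) :
    next_roll rolls n k = next_roll_alt rolls n k := by
  induction k with
  | zero =>
    rw [next_roll, next_roll_alt]
    simp only [Nat.cast_zero]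
    rw [PySem.List.pyRange_neg_one_cons (by omega : (-1 : Int) < 0),
        PySem.List.pyRange_neg_one_eq_nil (by omega : (0 : Int) - 1 ≤ -1)]
    have h0 : PySem.List.pyGet? rolls (0 : Int) = some (rolls[0]'(by omega)) := by
      simpa using PySem.List.pyGet?_ofNat (xs := rolls) (n := 0) (by omega)
    simp only [h0, List.any_cons, List.any_nil, Bool.or_false]
    have h0' : PySem.List.pyGet? rolls ((0 : Nat) : Int) = some (rolls[0]'(by omega)) := h0
    rw [h0']
    by_cases hv0 : rolls[0]'(by omega) < n <;> simp [hv0]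
  | succ m ih =>
    rw [next_roll, next_roll_alt,
        PySem.List.pyRange_neg_one_cons (by push_cast; omega : (-1 : Int) < (m + 1 : Nat))]
    have hg : PySem.List.pyGet? rolls ((m : Int) + 1)
        = some (rolls[m + 1]'(by omega)) := by
      have := PySem.List.pyGet?_ofNat (xs := rolls) (n := m + 1) (by omega)
      push_cast at this ⊢
      simpa using this
    have hstep : ((m + 1 : Nat) : Int) - 1 = (m : Nat) := by push_cast; omega
    have ih' := ih (by push_cast at hk ⊢; omega)
    rw [next_roll_alt] at ih'
    have hne : ((m + 1 : Nat) : Int) ≠ 0 := by push_cast; omega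
    push_cast
    rw [hg]
    push_cast at hstep hne
    by_cases hv : rolls[m + 1]'(by omega) < n
    · simp only [hg, List.any_cons, hv, decide_true, Bool.true_or, if_true]
    · simp only [hg, List.any_cons, if_neg hne, hstep, ih', hv,
        decide_false, Bool.false_or, if_false]

-- ===== VERDICT (by name: the statement is the Claim_ definition above) =====
theorem next_roll_spec : Claim_equal_next_roll := by
  intro rolls n idx _hdom hpre
  obtain ⟨h0, hlt⟩ := hpre
  unfold Spec_next_roll
  obtain ⟨k, rfl⟩ : ∃ k : Nat, (k : Int) = idx := ⟨idx.toNat, by omega⟩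
  exact next_roll_eq_alt_of_nat rolls n k hlt
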